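-- pv_equiv track=rewrite | github.com/oraby8/taxonomy_project | src/versions/v3/analysis/relations.py | ranking_list_of_topic
-- ===== SOURCE A (Python) =====
-- def ranking_list_of_topic(topics_list):
--     matching_topic = {}
--     for i in topics_list:
--         if i[0] not in matching_topic:
--             matching_topic[i[0]] = 0
--         else:
--             matching_topic[i[0]] = matching_topic[i[0]] + 1
--     list_of_topics = []
--     for topic in topics_list:
--         if list_of_topics:
--             if topic[0] not in [i[0] for i in list_of_topics]:
--                 list_of_topics.append(topic + [matching_topic[topic[0]]])
--         else:
--             list_of_topics.append(topic + [matching_topic[topic[0]]])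
--
--     list_of_topics = sorted(list_of_topics, key=lambda x: x[-1], reverse=True)
--     list_of_topics = [i[0] for i in list_of_topics]
--     return list_of_topics[:5]
-- ===== SOURCE B (Python) =====
-- def ranking_list_of_topic(topics_list):
--     counts = {}
--     for topic in topics_list:
--         counts[topic[0]] = counts.get(topic[0], 0) + 1
--     if not counts:
--         return []
--     # counting sort: bucket the names by frequency, then walk the buckets
--     # from the highest frequency down until 5 names are collected
--     buckets = {}
--     for name, c in counts.items():
--         buckets.setdefault(c, []).append(name)
--     result = []
--     for c in range(max(counts.values()), 0, -1):
--         result.extend(buckets.get(c, []))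
--         if len(result) >= 5:
--             break
--     return result[:5]
-- ===== Notes on version B (the rewrite author's own statement) =====
-- stated objective: faster
-- what changed: B replaces A's dedup-by-rescan loop plus comparison sort of enriched records with a counting sort: one counting pass, names bucketed by frequency in a dict, and buckets walked from the highest count down until 5 names are collected.
import Mathlib
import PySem

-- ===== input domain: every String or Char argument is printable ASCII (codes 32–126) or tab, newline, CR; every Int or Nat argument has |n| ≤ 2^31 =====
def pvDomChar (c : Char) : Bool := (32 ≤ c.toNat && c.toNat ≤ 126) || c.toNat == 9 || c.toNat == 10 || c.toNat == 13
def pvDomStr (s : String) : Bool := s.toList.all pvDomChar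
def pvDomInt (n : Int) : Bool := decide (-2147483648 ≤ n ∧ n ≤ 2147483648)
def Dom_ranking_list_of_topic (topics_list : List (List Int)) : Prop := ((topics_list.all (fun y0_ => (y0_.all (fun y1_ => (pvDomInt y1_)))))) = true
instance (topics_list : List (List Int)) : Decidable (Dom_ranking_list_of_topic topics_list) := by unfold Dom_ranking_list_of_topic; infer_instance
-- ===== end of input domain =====

-- B replaces A's dedup-by-rescan loop + comparison sort of enriched records with a counting sort
-- (names bucketed by frequency, buckets walked from the highest count downwards); objective: faster.

-- ===== PORT A =====
def ranking_list_of_topic (topics_list : List (List Int)) : List Int :=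
  -- i[0] raises IndexError on an empty inner list; Pre_ excludes those inputs (pyGetD is the total form under that precondition)
  let matching_topic : PySem.Dict Int Int :=
    topics_list.foldl (fun d i =>
      if d.contains (PySem.List.pyGetD i 0 0) = false then d.insert (PySem.List.pyGetD i 0 0) 0
      else d.insert (PySem.List.pyGetD i 0 0) (d.getD (PySem.List.pyGetD i 0 0) 0 + 1)) PySem.Dict.empty
  let list_of_topics : List (List Int) :=
    topics_list.foldl (fun acc topic =>
      if acc ≠ [] then
        if PySem.List.pyGetD topic 0 0 ∉ acc.map (fun i => PySem.List.pyGetD i 0 0) then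
          acc ++ [topic ++ [matching_topic.getD (PySem.List.pyGetD topic 0 0) 0]]
        else acc
      else acc ++ [topic ++ [matching_topic.getD (PySem.List.pyGetD topic 0 0) 0]]) []
  let sorted_topics := PySem.List.sorted list_of_topics (fun x => PySem.List.pyGetD x (-1) 0) true
  PySem.List.slice (sorted_topics.map (fun i => PySem.List.pyGetD i 0 0)) none (some 5)

-- ===== PORT B =====
-- the 'for c in range(…, 0, -1): … if len(result) >= 5: break' loop of Source B
def rankCollect (buckets : PySem.Dict Int (List Int)) : List Int → List Int → List Int
  | [], result => result
  | c :: cs, result =>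
    let result' := result ++ buckets.getD c []
    if 5 ≤ result'.length then result' else rankCollect buckets cs result'

def ranking_list_of_topic_alt (topics_list : List (List Int)) : List Int :=
  let counts : PySem.Dict Int Int :=
    topics_list.foldl (fun d topic =>
      d.insert (PySem.List.pyGetD topic 0 0) (d.getD (PySem.List.pyGetD topic 0 0) 0 + 1)) PySem.Dict.empty
  if counts.items = [] then []
  else
    let buckets : PySem.Dict Int (List Int) :=
      counts.items.foldl (fun b nc => b.modify nc.2 [] (fun l => l ++ [nc.1])) PySem.Dict.empty
    -- max(counts.values()) : counts is nonempty here, so max? is some; .getD 0 is never the default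
    let m : Int := (PySem.List.max? counts.values (fun v => v)).getD 0
    PySem.List.slice (rankCollect buckets (PySem.List.pyRange m 0 (-1)) []) none (some 5)

-- ===== PRECONDITION & SPEC =====
-- Pre_ excludes exactly the inputs with an empty inner list, on which Python A raises IndexError at i[0]
def Pre_ranking_list_of_topic (topics_list : List (List Int)) : Prop :=
  ∀ t ∈ topics_list, t ≠ []
instance (topics_list : List (List Int)) : Decidable (Pre_ranking_list_of_topic topics_list) := by
  unfold Pre_ranking_list_of_topic; infer_instance

def pvWitness_ranking_list_of_topic : List (List Int) := [[1, 7], [2], [1, 3]]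

def Spec_ranking_list_of_topic (topics_list : List (List Int)) (out : List Int) : Prop := out = ranking_list_of_topic_alt topics_list
instance (topics_list : List (List Int)) (out : List Int) : Decidable (Spec_ranking_list_of_topic topics_list out) := by unfold Spec_ranking_list_of_topic; infer_instance

-- ===== CLAIM (what is proved, stated in full; the proofs are below) =====
def Claim_equal_ranking_list_of_topic : Prop := ∀ (topics_list : List (List Int)), Dom_ranking_list_of_topic topics_list → Pre_ranking_list_of_topic topics_list → Spec_ranking_list_of_topic topics_list (ranking_list_of_topic topics_list)

-- ===== LEMMAS AND PROOFS =====

-- A's first loop, over the list of first elements: final value at k is (count of k) - 1 (0 on first sight, +1 after)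
lemma dictA_getD (l : List Int) (d : PySem.Dict Int Int) (k : Int) :
    (l.foldl (fun d x => if d.contains x = false then d.insert x 0
                         else d.insert x (d.getD x 0 + 1)) d).getD k 0
    = if l.count k = 0 then d.getD k 0
      else if d.contains k = true then d.getD k 0 + l.count k else (l.count k : Int) - 1 := by
  induction l generalizing d with
  | nil => simp
  | cons x t ih =>
    simp only [List.foldl_cons]
    by_cases hc : d.contains x = true
    · rw [if_neg (by simp [hc]), ih]
      by_cases hk : k = x
      · subst hk
        simp only [PySem.Dict.getD_insert, PySem.Dict.contains_insert, List.count_cons, hc,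
          beq_self_eq_true, Bool.true_or]
        split_ifs
        all_goals try exact ‹False›.elim
        all_goals (push_cast; omega)
      · simp [PySem.Dict.getD_insert, PySem.Dict.contains_insert, hk, Ne.symm hk]
    · have hc' : d.contains x = false := by simpa using hc
      rw [if_pos hc', ih]
      by_cases hk : k = x
      · subst hk
        simp only [PySem.Dict.getD_insert, PySem.Dict.contains_insert, List.count_cons, hc',
          beq_self_eq_true, Bool.true_or]
        split_ifs
        all_goals try exact ‹False›.elim
        all_goals (push_cast; omega)
      · simp [PySem.Dict.getD_insert, PySem.Dict.contains_insert, hk, Ne.symm hk]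

-- one insertion step commutes with mapping f when the comparisons agree on the existing elements
lemma map_insertBy {α β : Type} (f : α → β) (p : α → α → Bool) (q : β → β → Bool)
    (x : α) (ys : List α) (h : ∀ b ∈ ys, p x b = q (f x) (f b)) :
    (PySem.List.insertBy p x ys).map f = PySem.List.insertBy q (f x) (ys.map f) := by
  induction ys with
  | nil => simp [PySem.List.insertBy]
  | cons y t ih =>
    have hy : p x y = q (f x) (f y) := h y (by simp)
    by_cases hp : p x y = true
    · simp [PySem.List.insertBy, hp, ← hy]
    · simp only [Bool.not_eq_true] at hp
      simp [PySem.List.insertBy, hp, ← hy, ih (fun b hb => h b (by simp [hb]))]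

-- the whole insertion sort commutes with mapping f under the same agreement on all inputs
lemma map_foldl_insertBy {α β : Type} (f : α → β) (p : α → α → Bool) (q : β → β → Bool)
    (l acc : List α) (h : ∀ a ∈ l, ∀ b ∈ l ++ acc, p a b = q (f a) (f b)) :
    (l.foldl (fun acc x => PySem.List.insertBy p x acc) acc).map f
    = (l.map f).foldl (fun acc y => PySem.List.insertBy q y acc) (acc.map f) := by
  induction l generalizing acc with
  | nil => rfl
  | cons a t ih =>
    simp only [List.foldl_cons, List.map_cons]
    rw [← map_insertBy f p q a acc (fun b hb => h a (by simp) b (by simp [hb]))]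
    exact ih (PySem.List.insertBy p a acc)
      (fun a' ha' b hb => by
        rcases List.mem_append.1 hb with hb | hb
        · exact h a' (by simp [ha']) b (by simp [hb])
        · rcases (PySem.List.mem_insertBy p a b acc).1 hb with rfl | hb
          · exact h a' (by simp [ha']) b (by simp)
          · exact h a' (by simp [ha']) b (by simp [hb]))

-- A's second loop: every record is t ++ [M[t[0]]] with t[0] among the heads, and the record heads
-- are the deduplicated heads (first-occurrence order)
lemma loopR (M : PySem.Dict Int Int) (H : List Int) (l acc : List (List Int))
    (hl : ∀ t ∈ l, t ≠ []) (hH : ∀ t ∈ l, PySem.List.pyGetD t 0 0 ∈ H)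
    (hacc : ∀ r ∈ acc, ∃ t c, t ≠ [] ∧ r = t ++ [c] ∧ PySem.List.pyGetD t 0 0 ∈ H ∧
            c = M.getD (PySem.List.pyGetD t 0 0) 0) :
    (∀ r ∈ l.foldl (fun acc topic =>
        if PySem.List.pyGetD topic 0 0 ∉ acc.map (fun i => PySem.List.pyGetD i 0 0) then
          acc ++ [topic ++ [M.getD (PySem.List.pyGetD topic 0 0) 0]] else acc) acc,
      ∃ t c, t ≠ [] ∧ r = t ++ [c] ∧ PySem.List.pyGetD t 0 0 ∈ H ∧
             c = M.getD (PySem.List.pyGetD t 0 0) 0)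
    ∧ (l.foldl (fun acc topic =>
        if PySem.List.pyGetD topic 0 0 ∉ acc.map (fun i => PySem.List.pyGetD i 0 0) then
          acc ++ [topic ++ [M.getD (PySem.List.pyGetD topic 0 0) 0]] else acc) acc).map
          (fun i => PySem.List.pyGetD i 0 0)
      = PySem.Set.update (acc.map (fun i => PySem.List.pyGetD i 0 0))
          (l.map (fun t => PySem.List.pyGetD t 0 0)) := by
  induction l generalizing acc with
  | nil => exact ⟨hacc, rfl⟩
  | cons a t ih =>
    have ha : a ≠ [] := hl a (by simp)
    have haH : PySem.List.pyGetD a 0 0 ∈ H := hH a (by simp)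
    simp only [List.foldl_cons, List.map_cons]
    by_cases hmem : PySem.List.pyGetD a 0 0 ∈ acc.map (fun i => PySem.List.pyGetD i 0 0)
    · have hinit : (if PySem.List.pyGetD a 0 0 ∉ acc.map (fun i => PySem.List.pyGetD i 0 0) then
          acc ++ [a ++ [M.getD (PySem.List.pyGetD a 0 0) 0]] else acc) = acc := by simp [hmem]
      rw [hinit]
      have := ih acc (fun x hx => hl x (by simp [hx])) (fun x hx => hH x (by simp [hx])) hacc
      refine ⟨this.1, ?_⟩
      rw [this.2]
      simp only [PySem.Set.update, List.foldl_cons]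
      rw [PySem.Set.add_of_mem hmem]
    · have hinit : (if PySem.List.pyGetD a 0 0 ∉ acc.map (fun i => PySem.List.pyGetD i 0 0) then
          acc ++ [a ++ [M.getD (PySem.List.pyGetD a 0 0) 0]] else acc)
          = acc ++ [a ++ [M.getD (PySem.List.pyGetD a 0 0) 0]] := by simp [hmem]
      rw [hinit]
      have hstep : ∀ r ∈ acc ++ [a ++ [M.getD (PySem.List.pyGetD a 0 0) 0]],
          ∃ t c, t ≠ [] ∧ r = t ++ [c] ∧ PySem.List.pyGetD t 0 0 ∈ H ∧
                 c = M.getD (PySem.List.pyGetD t 0 0) 0 := by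
        intro r hr
        rcases List.mem_append.1 hr with hr | hr
        · exact hacc r hr
        · simp only [List.mem_singleton] at hr
          exact ⟨a, _, ha, hr, haH, rfl⟩
      have := ih _ (fun x hx => hl x (by simp [hx])) (fun x hx => hH x (by simp [hx])) hstep
      refine ⟨this.1, ?_⟩
      rw [this.2]
      simp only [PySem.Set.update, List.foldl_cons, List.map_append, List.map_cons, List.map_nil]
      rw [PySem.Set.add_of_not_mem hmem]
      congr 2
      cases a with
      | nil => exact absurd rfl ha
      | cons x xs => simp [PySem.List.pyGetD_zero]

-- head of a nonempty topic enriched with a trailing count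
lemma head_append_singleton (t : List Int) (c : Int) (h : t ≠ []) :
    PySem.List.pyGetD (t ++ [c]) 0 0 = PySem.List.pyGetD t 0 0 := by
  cases t with
  | nil => exact absurd rfl h
  | cons x xs => simp [PySem.List.pyGetD_zero]

-- A reduces to: the deduplicated heads, stably sorted by their multiplicity (descending), first 5
lemma A_eq_sortedForm (topics_list : List (List Int))
    (hpre : Pre_ranking_list_of_topic topics_list) :
    ranking_list_of_topic topics_list
    = PySem.List.slice
        (PySem.List.sorted (PySem.Set.ofList (topics_list.map (fun t => PySem.List.pyGetD t 0 0)))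
          (fun k => ((topics_list.map (fun t => PySem.List.pyGetD t 0 0)).count k : Int)) true)
        none (some 5) := by
  unfold ranking_list_of_topic
  simp only []
  congr 1
  have hMTeq : (topics_list.foldl (fun (d : PySem.Dict Int Int) i =>
        if d.contains (PySem.List.pyGetD i 0 0) = false then d.insert (PySem.List.pyGetD i 0 0) 0
        else d.insert (PySem.List.pyGetD i 0 0) (d.getD (PySem.List.pyGetD i 0 0) 0 + 1)) PySem.Dict.empty)
      = (topics_list.map (fun t => PySem.List.pyGetD t 0 0)).foldl
          (fun (d : PySem.Dict Int Int) x => if d.contains x = false then d.insert x 0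
           else d.insert x (d.getD x 0 + 1)) PySem.Dict.empty := by
    rw [List.foldl_map]
  have hMTcnt : ∀ k ∈ topics_list.map (fun t => PySem.List.pyGetD t 0 0),
      ((topics_list.foldl (fun (d : PySem.Dict Int Int) i =>
        if d.contains (PySem.List.pyGetD i 0 0) = false then d.insert (PySem.List.pyGetD i 0 0) 0
        else d.insert (PySem.List.pyGetD i 0 0) (d.getD (PySem.List.pyGetD i 0 0) 0 + 1)) PySem.Dict.empty).getD k 0)
      = ((topics_list.map (fun t => PySem.List.pyGetD t 0 0)).count k : Int) - 1 := by
    intro k hk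
    rw [hMTeq, dictA_getD]
    have : (topics_list.map (fun t => PySem.List.pyGetD t 0 0)).count k ≠ 0 := by
      simpa [List.count_eq_zero] using hk
    simp [this]
  -- A's second loop: merge the 'if list_of_topics:' branch (empty accumulator appends either way)
  have hstep : (fun (acc : List (List Int)) topic =>
      if acc ≠ [] then
        if PySem.List.pyGetD topic 0 0 ∉ acc.map (fun i => PySem.List.pyGetD i 0 0) then
          acc ++ [topic ++ [(topics_list.foldl (fun (d : PySem.Dict Int Int) i =>
            if d.contains (PySem.List.pyGetD i 0 0) = false then d.insert (PySem.List.pyGetD i 0 0) 0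
            else d.insert (PySem.List.pyGetD i 0 0) (d.getD (PySem.List.pyGetD i 0 0) 0 + 1))
            PySem.Dict.empty).getD (PySem.List.pyGetD topic 0 0) 0]]
        else acc
      else acc ++ [topic ++ [(topics_list.foldl (fun (d : PySem.Dict Int Int) i =>
            if d.contains (PySem.List.pyGetD i 0 0) = false then d.insert (PySem.List.pyGetD i 0 0) 0
            else d.insert (PySem.List.pyGetD i 0 0) (d.getD (PySem.List.pyGetD i 0 0) 0 + 1))
            PySem.Dict.empty).getD (PySem.List.pyGetD topic 0 0) 0]])
    = (fun (acc : List (List Int)) topic =>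
      if PySem.List.pyGetD topic 0 0 ∉ acc.map (fun i => PySem.List.pyGetD i 0 0) then
        acc ++ [topic ++ [(topics_list.foldl (fun (d : PySem.Dict Int Int) i =>
            if d.contains (PySem.List.pyGetD i 0 0) = false then d.insert (PySem.List.pyGetD i 0 0) 0
            else d.insert (PySem.List.pyGetD i 0 0) (d.getD (PySem.List.pyGetD i 0 0) 0 + 1))
            PySem.Dict.empty).getD (PySem.List.pyGetD topic 0 0) 0]] else acc) := by
    funext acc topic
    by_cases hacc : acc = []
    · subst hacc; simp
    · simp [hacc]
  rw [hstep]
  have hloop := loopR (topics_list.foldl (fun (d : PySem.Dict Int Int) i =>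
      if d.contains (PySem.List.pyGetD i 0 0) = false then d.insert (PySem.List.pyGetD i 0 0) 0
      else d.insert (PySem.List.pyGetD i 0 0) (d.getD (PySem.List.pyGetD i 0 0) 0 + 1)) PySem.Dict.empty)
    (topics_list.map (fun t => PySem.List.pyGetD t 0 0)) topics_list [] hpre
    (fun t ht => List.mem_map_of_mem ht) (by intro r hr; simp at hr)
  have hRheads : (topics_list.foldl (fun acc topic =>
      if PySem.List.pyGetD topic 0 0 ∉ acc.map (fun i => PySem.List.pyGetD i 0 0) then
        acc ++ [topic ++ [(topics_list.foldl (fun (d : PySem.Dict Int Int) i =>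
            if d.contains (PySem.List.pyGetD i 0 0) = false then d.insert (PySem.List.pyGetD i 0 0) 0
            else d.insert (PySem.List.pyGetD i 0 0) (d.getD (PySem.List.pyGetD i 0 0) 0 + 1))
            PySem.Dict.empty).getD (PySem.List.pyGetD topic 0 0) 0]] else acc) []).map
        (fun i => PySem.List.pyGetD i 0 0)
      = PySem.Set.ofList (topics_list.map (fun t => PySem.List.pyGetD t 0 0)) := by
    rw [hloop.2]; rfl
  -- key and head of every record
  have hreckey : ∀ r ∈ (topics_list.foldl (fun acc topic =>
      if PySem.List.pyGetD topic 0 0 ∉ acc.map (fun i => PySem.List.pyGetD i 0 0) then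
        acc ++ [topic ++ [(topics_list.foldl (fun (d : PySem.Dict Int Int) i =>
            if d.contains (PySem.List.pyGetD i 0 0) = false then d.insert (PySem.List.pyGetD i 0 0) 0
            else d.insert (PySem.List.pyGetD i 0 0) (d.getD (PySem.List.pyGetD i 0 0) 0 + 1))
            PySem.Dict.empty).getD (PySem.List.pyGetD topic 0 0) 0]] else acc) []),
      PySem.List.pyGetD r (-1) 0
        = ((topics_list.map (fun t => PySem.List.pyGetD t 0 0)).count (PySem.List.pyGetD r 0 0) : Int) - 1
      ∧ PySem.List.pyGetD r 0 0 ∈ topics_list.map (fun t => PySem.List.pyGetD t 0 0) := by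
    intro r hr
    obtain ⟨t, c, htne, rfl, htH, hc⟩ := hloop.1 r hr
    rw [head_append_singleton t c htne, PySem.List.pyGetD_neg_one_append_singleton]
    exact ⟨by rw [hc, hMTcnt _ htH], htH⟩
  -- exchange the final projection with the (stable) insertion sort, turning the key count-1 into count
  have h1 : (PySem.List.sorted (topics_list.foldl (fun acc topic =>
      if PySem.List.pyGetD topic 0 0 ∉ acc.map (fun i => PySem.List.pyGetD i 0 0) then
        acc ++ [topic ++ [(topics_list.foldl (fun (d : PySem.Dict Int Int) i =>
            if d.contains (PySem.List.pyGetD i 0 0) = false then d.insert (PySem.List.pyGetD i 0 0) 0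
            else d.insert (PySem.List.pyGetD i 0 0) (d.getD (PySem.List.pyGetD i 0 0) 0 + 1))
            PySem.Dict.empty).getD (PySem.List.pyGetD topic 0 0) 0]] else acc) [])
      (fun x => PySem.List.pyGetD x (-1) 0) true).map (fun i => PySem.List.pyGetD i 0 0)
      = ((topics_list.foldl (fun acc topic =>
      if PySem.List.pyGetD topic 0 0 ∉ acc.map (fun i => PySem.List.pyGetD i 0 0) then
        acc ++ [topic ++ [(topics_list.foldl (fun (d : PySem.Dict Int Int) i =>
            if d.contains (PySem.List.pyGetD i 0 0) = false then d.insert (PySem.List.pyGetD i 0 0) 0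
            else d.insert (PySem.List.pyGetD i 0 0) (d.getD (PySem.List.pyGetD i 0 0) 0 + 1))
            PySem.Dict.empty).getD (PySem.List.pyGetD topic 0 0) 0]] else acc) []).map
        (fun i => PySem.List.pyGetD i 0 0)).foldl
        (fun acc y => PySem.List.insertBy (fun a b =>
          decide (((topics_list.map (fun t => PySem.List.pyGetD t 0 0)).count b : Int)
            < ((topics_list.map (fun t => PySem.List.pyGetD t 0 0)).count a : Int))) y acc) [] := by
    rw [PySem.List.sorted_rev_eq_foldl_insertBy]
    refine map_foldl_insertBy (fun i => PySem.List.pyGetD i 0 0)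
      (fun a b => decide (PySem.List.pyGetD b (-1) 0 < PySem.List.pyGetD a (-1) 0))
      (fun a b => decide (((topics_list.map (fun t => PySem.List.pyGetD t 0 0)).count b : Int)
            < ((topics_list.map (fun t => PySem.List.pyGetD t 0 0)).count a : Int))) _ [] ?_
    intro a ha b hb
    rw [List.append_nil] at hb
    beta_reduce
    rw [(hreckey a ha).1, (hreckey b hb).1]
    simp only [decide_eq_decide]
    omega
  rw [h1, hRheads, PySem.List.sorted_rev_eq_foldl_insertBy]

-- placing an element whose comparison is false on all of P and true on the head of S
lemma insertBy_split {α : Type} (before : α → α → Bool) (x : α) (P S : List α)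
    (hP : ∀ p ∈ P, before x p = false) (hS : ∀ s t, S = s :: t → before x s = true) :
    PySem.List.insertBy before x (P ++ S) = P ++ x :: S := by
  induction P with
  | nil =>
    cases S with
    | nil => simp [PySem.List.insertBy]
    | cons s t => simp [PySem.List.insertBy, hS s t rfl]
  | cons p P' ih =>
    simp only [List.cons_append, PySem.List.insertBy, hP p (by simp)]
    simp only [Bool.false_eq_true, ite_false]
    rw [ih (fun q hq => hP q (by simp [hq]))]

-- a descending unit range split at an interior point
lemma pyRange_neg_one_split (lo c0 hi : Int) (h1 : lo < c0) (h2 : c0 ≤ hi) :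
    PySem.List.pyRange hi lo (-1)
    = PySem.List.pyRange hi c0 (-1) ++ c0 :: PySem.List.pyRange (c0 - 1) lo (-1) := by
  rw [PySem.List.pyRange_neg_one_eq_reverse,
    PySem.List.pyRange_one_append (lo + 1) (c0 + 1) (hi + 1) (by omega) (by omega),
    List.reverse_append, ← PySem.List.pyRange_neg_one_eq_reverse,
    ← PySem.List.pyRange_neg_one_eq_reverse, PySem.List.pyRange_neg_one_cons h1]

-- counting sort: a stable descending sort by an Int key is the concatenation of the key's
-- fibers taken in decreasing key order
lemma sorted_rev_eq_flatMap_buckets (l : List Int) (key : Int → Int) (lo hi : Int)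
    (h : ∀ x ∈ l, lo < key x ∧ key x ≤ hi) :
    PySem.List.sorted l key true
    = (PySem.List.pyRange hi lo (-1)).flatMap (fun c => l.filter (fun x => key x == c)) := by
  rw [PySem.List.sorted_rev_eq_foldl_insertBy]
  induction l using List.reverseRecOn with
  | nil => simp
  | append_singleton l' x ih =>
    have hx := h x (by simp)
    have hl' : ∀ y ∈ l', lo < key y ∧ key y ≤ hi := fun y hy => h y (by simp [hy])
    rw [List.foldl_append, List.foldl_cons, List.foldl_nil, ih hl']
    rw [pyRange_neg_one_split lo (key x) hi hx.1 hx.2]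
    have hfib : ∀ (r : List Int), (∀ c ∈ r, c ≠ key x) →
        r.flatMap (fun c => (l' ++ [x]).filter (fun y => key y == c))
        = r.flatMap (fun c => l'.filter (fun y => key y == c)) := by
      intro r hr
      refine List.flatMap_congr (fun c hc => ?_)
      have : (key x == c) = false := by
        simpa using fun hkc => hr c hc (by omega)
      simp [List.filter_append, this]
    have hhi : ∀ c ∈ PySem.List.pyRange hi (key x) (-1), c ≠ key x := by
      intro c hc
      have := (PySem.List.mem_pyRange_neg_one).1 hc
      omega
    have hlo : ∀ c ∈ PySem.List.pyRange (key x - 1) lo (-1), c ≠ key x := by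
      intro c hc
      have := (PySem.List.mem_pyRange_neg_one).1 hc
      omega
    rw [List.flatMap_append, List.flatMap_cons, List.flatMap_append, List.flatMap_cons,
      hfib _ hhi, hfib _ hlo]
    have hself : (l' ++ [x]).filter (fun y => key y == key x)
        = l'.filter (fun y => key y == key x) ++ [x] := by
      simp [List.filter_append]
    rw [hself]
    -- insert x: false on the high buckets and on its own fiber, true on the head of the low part
    have := insertBy_split (fun a b => decide (key b < key a)) x
      ((PySem.List.pyRange hi (key x) (-1)).flatMap (fun c => l'.filter (fun y => key y == c))
        ++ l'.filter (fun y => key y == key x))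
      ((PySem.List.pyRange (key x - 1) lo (-1)).flatMap (fun c => l'.filter (fun y => key y == c)))
      (by
        intro p hp
        rcases List.mem_append.1 hp with hp | hp
        · obtain ⟨c, hc, hpc⟩ := List.mem_flatMap.1 hp
          have hcr := (PySem.List.mem_pyRange_neg_one).1 hc
          have : key p = c := by simpa using (List.mem_filter.1 hpc).2
          simp only [decide_eq_false_iff_not, not_lt]
          omega
        · have : key p = key x := by simpa using (List.mem_filter.1 hp).2
          simp [this])
      (by
        intro s t hst
        have hs : s ∈ (PySem.List.pyRange (key x - 1) lo (-1)).flatMap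
            (fun c => l'.filter (fun y => key y == c)) := by rw [hst]; simp
        obtain ⟨c, hc, hsc⟩ := List.mem_flatMap.1 hs
        have hcr := (PySem.List.mem_pyRange_neg_one).1 hc
        have : key s = c := by simpa using (List.mem_filter.1 hsc).2
        simp only [decide_eq_true_eq]
        omega)
    simpa [List.append_assoc] using this

-- the collect loop with its early break has the same first five elements as the full walk
lemma slice_rankCollect (buckets : PySem.Dict Int (List Int)) (cs r : List Int) :
    (rankCollect buckets cs r).take 5
    = (r ++ cs.flatMap (fun c => buckets.getD c [])).take 5 := by
  induction cs generalizing r with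
  | nil => simp [rankCollect]
  | cons c cs' ih =>
    simp only [rankCollect, List.flatMap_cons]
    by_cases hlen : 5 ≤ (r ++ buckets.getD c []).length
    · rw [if_pos hlen, ← List.append_assoc, List.take_append_of_le_length hlen]
    · rw [if_neg hlen, ih, List.append_assoc]

-- ===== VERDICT =====
theorem ranking_list_of_topic_spec : Claim_equal_ranking_list_of_topic := by
  intro topics_list _hdom hpre
  unfold Spec_ranking_list_of_topic
  rw [A_eq_sortedForm topics_list hpre]
  unfold ranking_list_of_topic_alt
  simp only []
  -- names for the pieces
  have hcnt : (topics_list.foldl (fun (d : PySem.Dict Int Int) topic =>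
        d.insert (PySem.List.pyGetD topic 0 0) (d.getD (PySem.List.pyGetD topic 0 0) 0 + 1)) PySem.Dict.empty)
      = PySem.Dict.counter (topics_list.map (fun t => PySem.List.pyGetD t 0 0)) := by
    rw [← List.foldl_map (g := fun (d : PySem.Dict Int Int) x => d.insert x (d.getD x 0 + 1))
      (f := fun t => PySem.List.pyGetD t 0 0),
      PySem.Dict.foldl_insert_getD_add_one_eq_counter]
  rw [hcnt]
  by_cases hemp : (PySem.Dict.counter (topics_list.map (fun t => PySem.List.pyGetD t 0 0))).items = []
  · rw [if_pos hemp]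
    have : PySem.Set.ofList (topics_list.map (fun t => PySem.List.pyGetD t 0 0)) = [] := by
      have := hemp
      rw [PySem.Dict.items_counter] at this
      exact List.map_eq_nil_iff.1 this
    rw [this]
    simp [pysem]
  · rw [if_neg hemp]
    have hofne : PySem.Set.ofList (topics_list.map (fun t => PySem.List.pyGetD t 0 0)) ≠ [] := by
      intro hc
      rw [PySem.Dict.items_counter, hc] at hemp
      exact hemp rfl
    -- the bucket dict as a fiber map
    have hbuck : ∀ c : Int,
        (((PySem.Dict.counter (topics_list.map (fun t => PySem.List.pyGetD t 0 0))).items.foldl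
          (fun b nc => b.modify nc.2 [] (fun l => l ++ [nc.1])) PySem.Dict.empty).getD c [])
        = (PySem.Set.ofList (topics_list.map (fun t => PySem.List.pyGetD t 0 0))).filter
            (fun k => ((topics_list.map (fun t => PySem.List.pyGetD t 0 0)).count k : Int) == c) := by
      intro c
      rw [← List.foldl_map (f := fun nc : Int × Int => (nc.2, nc.1))
        (g := fun (b : PySem.Dict Int (List Int)) p => b.modify p.1 [] (fun l => l ++ [p.2])),
        PySem.Dict.getD_foldl_modify_append, PySem.Dict.items_counter]
      simp [List.filter_map, List.map_map, Function.comp_def]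
    -- the maximum of the counts
    have hvals : (PySem.Dict.counter (topics_list.map (fun t => PySem.List.pyGetD t 0 0))).values
        = (PySem.Set.ofList (topics_list.map (fun t => PySem.List.pyGetD t 0 0))).map
            (fun k => ((topics_list.map (fun t => PySem.List.pyGetD t 0 0)).count k : Int)) := by
      have : (PySem.Dict.counter (topics_list.map (fun t => PySem.List.pyGetD t 0 0))).values
          = (PySem.Dict.counter (topics_list.map (fun t => PySem.List.pyGetD t 0 0))).items.map (·.2) := rfl
      rw [this, PySem.Dict.items_counter, List.map_map]
      rfl
    obtain ⟨m, hm⟩ : ∃ m, PySem.List.max?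
        ((PySem.Dict.counter (topics_list.map (fun t => PySem.List.pyGetD t 0 0))).values)
        (fun v => v) = some m := by
      rcases hval : PySem.List.max?
        ((PySem.Dict.counter (topics_list.map (fun t => PySem.List.pyGetD t 0 0))).values)
        (fun v => v) with _ | m
      · exfalso
        have := (PySem.List.max?_eq_none_iff _ _).1 hval
        rw [hvals] at this
        exact hofne (List.map_eq_nil_iff.1 this)
      · exact ⟨m, rfl⟩
    rw [hm]
    simp only [Option.getD_some]
    -- bounds on the key over the deduplicated heads
    have hbound : ∀ k ∈ PySem.Set.ofList (topics_list.map (fun t => PySem.List.pyGetD t 0 0)),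
        0 < ((topics_list.map (fun t => PySem.List.pyGetD t 0 0)).count k : Int)
        ∧ ((topics_list.map (fun t => PySem.List.pyGetD t 0 0)).count k : Int) ≤ m := by
      intro k hk
      have hkmem : k ∈ topics_list.map (fun t => PySem.List.pyGetD t 0 0) :=
        (PySem.Set.mem_ofList _ _).1 hk
      constructor
      · exact_mod_cast List.count_pos_iff.2 hkmem
      · exact PySem.List.max?_isMax hm _ (by rw [hvals]; exact List.mem_map_of_mem hk)
    -- assemble
    have h5 : ∀ xs : List Int, PySem.List.slice xs none (some 5) = xs.take 5 := by
      intro xs; simp [pysem]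
    rw [h5, h5, slice_rankCollect, List.nil_append]
    congr 1
    rw [sorted_rev_eq_flatMap_buckets _ _ 0 m hbound]
    refine List.flatMap_congr (fun c _ => ?_)
    rw [hbuck c]
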